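-- pv_equiv track=rewrite | github.com/dsa934/CT_examples | BaekJoon/bfs_dfs_025.py | bfs
-- ===== SOURCE A (Python) =====
-- from collections import deque
--
-- def bfs(num, numbers, start):
--
--
--     queue = deque([start])
--
--     visited =[start]
--
--
--     while queue :
--
--         _node = queue.popleft()
--
--         dx = [ numbers[_node], -numbers[_node] ]
--
--         for way in dx :
--
--             n_node = _node + way
--
--             if n_node <= 0 or n_node > num :
--                 continue
--
--             if n_node not in visited:
--
--                 visited.append(n_node)
--                 queue.append(n_node)
--
--     return len(visited)
-- ===== SOURCE B (Python) =====
-- def bfs(num, numbers, start):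
--     visited = {start}
--     changed = True
--     while changed:
--         changed = False
--         for node in list(visited):
--             w = numbers[node]
--             for way in (w, -w):
--                 n = node + way
--                 if 1 <= n <= num and n not in visited:
--                     visited.add(n)
--                     changed = True
--     return len(visited)
-- ===== Notes on version B (the rewrite author's own statement) =====
-- stated objective: alternative
-- what changed: Replaces the deque-driven BFS (pop a node, expand, enqueue new ones) by a queueless fixpoint iteration that repeatedly rescans the reached set and adds in-range neighbours until a full pass adds nothing; the count of reached positions is identical.
-- outside the precondition, e.g. on bfs(5, [9, 9, 9], 1): A returns 1, B returns 1; on bfs(5, [1, 1, 1, 1], 1): A raises IndexError, B raises IndexError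
import Mathlib
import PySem

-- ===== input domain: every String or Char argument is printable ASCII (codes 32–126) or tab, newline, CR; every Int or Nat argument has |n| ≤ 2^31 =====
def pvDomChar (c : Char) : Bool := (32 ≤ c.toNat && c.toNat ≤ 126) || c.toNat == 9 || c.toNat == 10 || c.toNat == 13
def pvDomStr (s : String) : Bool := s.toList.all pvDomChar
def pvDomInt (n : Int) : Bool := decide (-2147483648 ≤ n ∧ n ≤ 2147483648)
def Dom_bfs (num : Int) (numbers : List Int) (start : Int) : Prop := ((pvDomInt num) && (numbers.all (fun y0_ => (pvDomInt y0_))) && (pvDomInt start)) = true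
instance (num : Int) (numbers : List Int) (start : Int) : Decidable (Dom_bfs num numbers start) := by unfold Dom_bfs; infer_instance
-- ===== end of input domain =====

-- B replaces A's queue-driven BFS by a queueless fixpoint: repeatedly rescan the reached
-- set and add in-range neighbours until a full pass adds nothing (objective: alternative).

-- ===== PORT A =====
-- one 'for way in dx' body: skip the out-of-range neighbour _node + way, else append it
-- to queue and visited if unseen
def stepA (num node : Int) (st : List Int × List Int) (way : Int) : List Int × List Int :=
  match st with
  | (queue, visited) =>
      if node + way ≤ 0 ∨ num < node + way then (queue, visited)
      else if node + way ∈ visited then (queue, visited)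
      else (queue ++ [node + way], visited ++ [node + way])

-- the while loop over (queue, visited); fuel only makes the recursion structural
def bfsLoopA (num : Int) (numbers : List Int) : Nat → List Int → List Int → List Int
  | 0, _, visited => visited
  | _ + 1, [], visited => visited
  | fuel + 1, node :: queue, visited =>
      let w := PySem.List.pyGetD numbers node 0   -- numbers[_node]; exact under Pre_bfs
      let st := [w, -w].foldl (stepA num node) (queue, visited)
      bfsLoopA num numbers fuel st.1 st.2

def bfs (num : Int) (numbers : List Int) (start : Int) : Int :=
  ((bfsLoopA num numbers (num.toNat + 1) [start] [start]).length : Int)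

-- ===== PORT B =====
-- one 'for way in (w, -w)' body of Source B: add the in-range unseen neighbour node + way
-- to the live set and flag the change
def stepB (num node : Int) (st : PySem.Set Int × Bool) (way : Int) : PySem.Set Int × Bool :=
  match st with
  | (visited, changed) =>
      if 1 ≤ node + way ∧ node + way ≤ num ∧ PySem.Set.contains visited (node + way) = false
      then (PySem.Set.add visited (node + way), true)
      else (visited, changed)

-- one full pass of Source B: scan a snapshot of visited against the live set
def bfsPassB (num : Int) (numbers : List Int) (snapshot : List Int)
    (st : PySem.Set Int × Bool) : PySem.Set Int × Bool :=
  snapshot.foldl (fun st node =>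
    let w := PySem.List.pyGetD numbers node 0   -- numbers[node]; exact under Pre_bfs
    [w, -w].foldl (stepB num node) st) st

-- the 'while changed' fixpoint loop; fuel only makes the recursion structural
def bfsFixB (num : Int) (numbers : List Int) : Nat → PySem.Set Int → PySem.Set Int
  | 0, visited => visited
  | fuel + 1, visited =>
      let st := bfsPassB num numbers visited (visited, false)
      if st.2 then bfsFixB num numbers fuel st.1 else st.1

def bfs_alt (num : Int) (numbers : List Int) (start : Int) : Int :=
  ((bfsFixB num numbers (num.toNat + 2) (PySem.Set.ofList [start])).length : Int)

-- ===== PRECONDITION & SPEC =====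
-- Pre_ over-approximates A's IndexError region by the closed-form condition that every
-- position A can ever index (start and each position in 1..num) is a valid Python index;
-- outside Pre_ A and B still behave identically — both raise IndexError, or, when the
-- out-of-range positions happen to be unreachable, both return the same count (see the
-- cites) — the exclusion only reflects that A's exact crash region is a reachability
-- property of numbers, not a closed-form condition on the input.
def Pre_bfs (num : Int) (numbers : List Int) (start : Int) : Prop :=
  -(numbers.length : Int) ≤ start ∧ start < (numbers.length : Int) ∧ num < (numbers.length : Int)
instance (num : Int) (numbers : List Int) (start : Int) : Decidable (Pre_bfs num numbers start) := by
  unfold Pre_bfs; infer_instance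
def pvWitness_bfs : Int × List Int × Int := (2, [1, 1, 1], 0)
def Spec_bfs (num : Int) (numbers : List Int) (start : Int) (out : Int) : Prop := out = bfs_alt num numbers start
instance (num : Int) (numbers : List Int) (start : Int) (out : Int) : Decidable (Spec_bfs num numbers start out) := by unfold Spec_bfs; infer_instance

-- ===== CLAIM (what is proved, stated in full; the proofs are below) =====
def Claim_equal_bfs : Prop := ∀ (num : Int) (numbers : List Int) (start : Int), Dom_bfs num numbers start → Pre_bfs num numbers start → Spec_bfs num numbers start (bfs num numbers start)

-- ===== LEMMAS AND PROOFS =====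

-- the two candidate neighbours of a position
def nbrs (numbers : List Int) (x : Int) : List Int :=
  [x + PySem.List.pyGetD numbers x 0, x + -(PySem.List.pyGetD numbers x 0)]

-- a set closed under taking in-range neighbours
def GoodSet (num : Int) (numbers : List Int) (S : List Int) : Prop :=
  ∀ x ∈ S, ∀ y ∈ nbrs numbers x, 1 ≤ y → y ≤ num → y ∈ S

-- number of elements lying in [1, num]
def countIn (num : Int) (S : List Int) : Nat :=
  (S.filter (fun x => decide (1 ≤ x ∧ x ≤ num))).length

lemma countIn_le (num : Int) (S : List Int) (h : S.Nodup) : countIn num S ≤ num.toNat := by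
  have hn : (S.filter (fun x => decide (1 ≤ x ∧ x ≤ num))).Nodup := h.filter _
  have hsub : (S.filter (fun x => decide (1 ≤ x ∧ x ≤ num))).toFinset ⊆ Finset.Icc (1:ℤ) num := by
    intro x hx
    rw [List.mem_toFinset, List.mem_filter] at hx
    have := hx.2
    simp only [decide_eq_true_eq] at this
    rw [Finset.mem_Icc]
    exact this
  have h1 : (S.filter (fun x => decide (1 ≤ x ∧ x ≤ num))).toFinset.card = countIn num S :=
    List.toFinset_card_of_nodup hn
  have h2 := Finset.card_le_card hsub
  rw [h1] at h2
  have h3 : (Finset.Icc (1:ℤ) num).card = (num + 1 - 1).toNat := Int.card_Icc 1 num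
  omega

lemma countIn_append (num : Int) (S T : List Int) :
    countIn num (S ++ T) = countIn num S + countIn num T := by
  simp [countIn, List.filter_append]

lemma countIn_all (num : Int) (S : List Int) (h : ∀ x ∈ S, 1 ≤ x ∧ x ≤ num) :
    countIn num S = S.length := by
  have hf : S.filter (fun x => decide (1 ≤ x ∧ x ≤ num)) = S :=
    List.filter_eq_self.mpr (fun a ha => decide_eq_true (h a ha))
  unfold countIn
  rw [hf]

-- the inner fold of A appends the same fresh block δ to queue and visited
lemma foldA_spec (num node : Int) : ∀ (ways : List Int) (q v : List Int), v.Nodup →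
    ∃ δ : List Int,
      (ways.foldl (stepA num node) (q, v)) = (q ++ δ, v ++ δ) ∧
      (v ++ δ).Nodup ∧
      (∀ d ∈ δ, (1 ≤ d ∧ d ≤ num) ∧ ∃ way ∈ ways, d = node + way) ∧
      (∀ way ∈ ways, 1 ≤ node + way → node + way ≤ num → node + way ∈ v ++ δ) := by
  intro ways
  induction ways with
  | nil =>
    intro q v hv
    exact ⟨[], by simp, by simpa using hv, by simp, by simp⟩
  | cons way ways ih =>
    intro q v hv
    by_cases h1 : node + way ≤ 0 ∨ num < node + way
    · obtain ⟨δ, he, hnd, hdc, hcl⟩ := ih q v hv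
      refine ⟨δ, ?_, hnd, ?_, ?_⟩
      · rw [List.foldl_cons]
        have hstep : stepA num node (q, v) way = (q, v) := by
          simp only [stepA]
          rw [if_pos h1]
        rw [hstep]
        exact he
      · intro d hd
        obtain ⟨hr, way', hw', he'⟩ := hdc d hd
        exact ⟨hr, way', List.mem_cons_of_mem _ hw', he'⟩
      · intro w hw hge hle
        rcases List.mem_cons.mp hw with rfl | hw
        · omega
        · exact hcl w hw hge hle
    · by_cases h2 : node + way ∈ v
      · obtain ⟨δ, he, hnd, hdc, hcl⟩ := ih q v hv
        refine ⟨δ, ?_, hnd, ?_, ?_⟩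
        · rw [List.foldl_cons]
          have hstep : stepA num node (q, v) way = (q, v) := by
            simp only [stepA]
            rw [if_neg h1, if_pos h2]
          rw [hstep]
          exact he
        · intro d hd
          obtain ⟨hr, way', hw', he'⟩ := hdc d hd
          exact ⟨hr, way', List.mem_cons_of_mem _ hw', he'⟩
        · intro w hw hge hle
          rcases List.mem_cons.mp hw with rfl | hw
          · exact List.mem_append_left _ h2
          · exact hcl w hw hge hle
      · have hv' : (v ++ [node + way]).Nodup := by
          rw [List.nodup_append]
          refine ⟨hv, List.nodup_singleton _, ?_⟩
          intro a ha b hb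
          simp only [List.mem_singleton] at hb
          subst hb
          rintro rfl
          exact h2 ha
        obtain ⟨δ, he, hnd, hdc, hcl⟩ := ih (q ++ [node + way]) (v ++ [node + way]) hv'
        refine ⟨(node + way) :: δ, ?_, ?_, ?_, ?_⟩
        · rw [List.foldl_cons]
          have hstep : stepA num node (q, v) way = (q ++ [node + way], v ++ [node + way]) := by
            simp only [stepA]
            rw [if_neg h1, if_neg h2]
          rw [hstep, he]
          simp [List.append_assoc]
        · simpa [List.append_assoc] using hnd
        · intro d hd
          rcases List.mem_cons.mp hd with rfl | hd
          · exact ⟨by omega, way, by simp, rfl⟩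
          · obtain ⟨hr, way', hw', he'⟩ := hdc d hd
            exact ⟨hr, way', List.mem_cons_of_mem _ hw', he'⟩
        · intro w hw hge hle
          rcases List.mem_cons.mp hw with rfl | hw
          · simp
          · have := hcl w hw hge hle
            simp only [List.mem_append, List.mem_cons] at this ⊢
            tauto

lemma foldA_sub (num node : Int) (T : List Int) :
    ∀ (ways : List Int) (st : List Int × List Int),
      (∀ way ∈ ways, 1 ≤ node + way → node + way ≤ num → node + way ∈ T) →
      (∀ x ∈ st.1, x ∈ T) → (∀ x ∈ st.2, x ∈ T) →
      (∀ x ∈ (ways.foldl (stepA num node) st).1, x ∈ T) ∧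
      (∀ x ∈ (ways.foldl (stepA num node) st).2, x ∈ T) := by
  intro ways
  induction ways with
  | nil => intro st _ hq hv; exact ⟨hq, hv⟩
  | cons way ways ih =>
    intro st hways hq hv
    obtain ⟨q, v⟩ := st
    rw [List.foldl_cons]
    apply ih
    · intro w hw; exact hways w (List.mem_cons_of_mem _ hw)
    · simp only [stepA]
      split_ifs with hc1 hc2
      · exact hq
      · exact hq
      · intro x hx
        rcases List.mem_append.mp hx with hx | hx
        · exact hq x hx
        · simp only [List.mem_singleton] at hx
          subst hx
          exact hways way (by simp) (by omega) (by omega)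
    · simp only [stepA]
      split_ifs with hc1 hc2
      · exact hv
      · exact hv
      · intro x hx
        rcases List.mem_append.mp hx with hx | hx
        · exact hv x hx
        · simp only [List.mem_singleton] at hx
          subst hx
          exact hways way (by simp) (by omega) (by omega)

lemma loopA_good (num : Int) (numbers : List Int) (start : Int) :
    ∀ (fuel : Nat) (queue visited : List Int),
      visited.Nodup → queue.Nodup → (∀ q ∈ queue, q ∈ visited) →
      (∀ v ∈ visited, v ∉ queue → ∀ y ∈ nbrs numbers v, 1 ≤ y → y ≤ num → y ∈ visited) →
      (∀ v ∈ visited, v = start ∨ (1 ≤ v ∧ v ≤ num)) →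
      queue.length + num.toNat ≤ fuel + countIn num visited →
      (∀ x ∈ visited, x ∈ bfsLoopA num numbers fuel queue visited) ∧
      (bfsLoopA num numbers fuel queue visited).Nodup ∧
      GoodSet num numbers (bfsLoopA num numbers fuel queue visited) := by
  intro fuel
  induction fuel with
  | zero =>
    intro queue visited hnv hnq hqv hexp hdom hm
    have hc := countIn_le num visited hnv
    cases queue with
    | cons a l =>
      exfalso
      simp only [List.length_cons] at hm
      omega
    | nil =>
      refine ⟨by intro x hx; simpa [bfsLoopA] using hx, by simpa [bfsLoopA] using hnv, ?_⟩
      intro x hx y hy hy1 hy2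
      simp only [bfsLoopA] at hx ⊢
      exact hexp x hx (by simp) y hy hy1 hy2
  | succ fuel ih =>
    intro queue visited hnv hnq hqv hexp hdom hm
    cases queue with
    | nil =>
      refine ⟨by intro x hx; simpa [bfsLoopA] using hx, by simpa [bfsLoopA] using hnv, ?_⟩
      intro x hx y hy hy1 hy2
      simp only [bfsLoopA] at hx ⊢
      exact hexp x hx (by simp) y hy hy1 hy2
    | cons node rest =>
      obtain ⟨δ, he, hnd, hdc, hcl⟩ :=
        foldA_spec num node [PySem.List.pyGetD numbers node 0, -(PySem.List.pyGetD numbers node 0)]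
          rest visited hnv
      have hloop : bfsLoopA num numbers (fuel + 1) (node :: rest) visited =
          bfsLoopA num numbers fuel (rest ++ δ) (visited ++ δ) := by
        simp only [bfsLoopA, he]
      obtain ⟨-, hδnd, hdisj⟩ := List.nodup_append.mp hnd
      have hrest : rest.Nodup := (List.nodup_cons.mp hnq).2
      have hδfresh : ∀ d ∈ δ, d ∉ visited := fun d hd hdv => hdisj d hdv d hd rfl
      have hq' : (rest ++ δ).Nodup := by
        rw [List.nodup_append]
        refine ⟨hrest, hδnd, ?_⟩
        intro a ha b hb
        rintro rfl
        exact hδfresh a hb (hqv a (List.mem_cons_of_mem _ ha))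
      have hqv' : ∀ q ∈ rest ++ δ, q ∈ visited ++ δ := by
        intro a ha
        rcases List.mem_append.mp ha with ha | ha
        · exact List.mem_append_left _ (hqv a (List.mem_cons_of_mem _ ha))
        · exact List.mem_append_right _ ha
      have hexp' : ∀ v ∈ visited ++ δ, v ∉ rest ++ δ →
          ∀ y ∈ nbrs numbers v, 1 ≤ y → y ≤ num → y ∈ visited ++ δ := by
        intro v hv hvq y hy hy1 hy2
        rcases List.mem_append.mp hv with hvv | hvδ
        · by_cases hvn : v = node
          · subst hvn
            have hy' : y = v + PySem.List.pyGetD numbers v 0 ∨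
                y = v + -(PySem.List.pyGetD numbers v 0) := by simpa [nbrs] using hy
            rcases hy' with rfl | rfl
            · exact hcl _ (by simp) hy1 hy2
            · exact hcl _ (by simp) hy1 hy2
          · have hvnr : v ∉ node :: rest := by
              intro hmem
              rcases List.mem_cons.mp hmem with h | h
              · exact hvn h
              · exact hvq (List.mem_append_left _ h)
            exact List.mem_append_left _ (hexp v hvv hvnr y hy hy1 hy2)
        · exact absurd (List.mem_append_right rest hvδ) hvq
      have hdom' : ∀ v ∈ visited ++ δ, v = start ∨ (1 ≤ v ∧ v ≤ num) := by
        intro v hv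
        rcases List.mem_append.mp hv with hv | hv
        · exact hdom v hv
        · exact Or.inr (hdc v hv).1
      have hδlen : countIn num δ = δ.length := countIn_all num δ (fun d hd => (hdc d hd).1)
      have hm' : (rest ++ δ).length + num.toNat ≤ fuel + countIn num (visited ++ δ) := by
        rw [countIn_append, hδlen]
        simp only [List.length_append]
        simp only [List.length_cons] at hm
        omega
      obtain ⟨ihmem, ihnd, ihgood⟩ := ih (rest ++ δ) (visited ++ δ) hnd hq' hqv' hexp' hdom' hm'
      rw [hloop]
      exact ⟨fun x hx => ihmem x (List.mem_append_left _ hx), ihnd, ihgood⟩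

lemma loopA_subset (num : Int) (numbers : List Int) (T : List Int) (hT : GoodSet num numbers T) :
    ∀ (fuel : Nat) (queue visited : List Int),
      (∀ q ∈ queue, q ∈ T) → (∀ v ∈ visited, v ∈ T) →
      ∀ x ∈ bfsLoopA num numbers fuel queue visited, x ∈ T := by
  intro fuel
  induction fuel with
  | zero =>
    intro queue visited hq hv x hx
    exact hv x (by simpa [bfsLoopA] using hx)
  | succ fuel ih =>
    intro queue visited hq hv x hx
    cases queue with
    | nil => exact hv x (by simpa [bfsLoopA] using hx)
    | cons node rest =>
      have hnode : node ∈ T := hq node (by simp)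
      have hways : ∀ way ∈ [PySem.List.pyGetD numbers node 0, -(PySem.List.pyGetD numbers node 0)],
          1 ≤ node + way → node + way ≤ num → node + way ∈ T := by
        intro way hw hw1 hw2
        refine hT node hnode (node + way) ?_ hw1 hw2
        rcases (by simpa using hw : way = PySem.List.pyGetD numbers node 0 ∨
            way = -(PySem.List.pyGetD numbers node 0)) with rfl | rfl
        · simp [nbrs]
        · simp [nbrs]
      obtain ⟨hq', hv'⟩ := foldA_sub num node T
        [PySem.List.pyGetD numbers node 0, -(PySem.List.pyGetD numbers node 0)]
        (rest, visited) hways (fun a ha => hq a (List.mem_cons_of_mem _ ha)) hv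
      simp only [bfsLoopA] at hx
      exact ih _ _ hq' hv' x hx

-- the inner fold of B appends a fresh block δ and ORs the change flag
lemma foldB_spec (num node : Int) : ∀ (ways : List Int) (s : List Int) (b : Bool), s.Nodup →
    ∃ δ : List Int,
      (ways.foldl (stepB num node) (s, b)) = (s ++ δ, b || !δ.isEmpty) ∧
      (s ++ δ).Nodup ∧
      (∀ d ∈ δ, (1 ≤ d ∧ d ≤ num) ∧ ∃ way ∈ ways, d = node + way) ∧
      (∀ way ∈ ways, 1 ≤ node + way → node + way ≤ num → node + way ∈ s ++ δ) := by
  intro ways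
  induction ways with
  | nil =>
    intro s b hs
    exact ⟨[], by simp, by simpa using hs, by simp, by simp⟩
  | cons way ways ih =>
    intro s b hs
    by_cases hc : 1 ≤ node + way ∧ node + way ≤ num ∧ PySem.Set.contains s (node + way) = false
    · have hnotmem : node + way ∉ s := by simpa using hc.2.2
      have hadd : PySem.Set.add s (node + way) = s ++ [node + way] := by
        simp [PySem.Set.add, hnotmem]
      have hs' : (s ++ [node + way]).Nodup := by
        rw [List.nodup_append]
        refine ⟨hs, List.nodup_singleton _, ?_⟩
        intro a ha b' hb
        simp only [List.mem_singleton] at hb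
        subst hb
        rintro rfl
        exact hnotmem ha
      obtain ⟨δ, he, hnd, hdc, hcl⟩ := ih (s ++ [node + way]) true hs'
      refine ⟨(node + way) :: δ, ?_, ?_, ?_, ?_⟩
      · rw [List.foldl_cons]
        have hstep : stepB num node (s, b) way = (s ++ [node + way], true) := by
          simp only [stepB]
          rw [if_pos hc, hadd]
        rw [hstep, he]
        simp [List.append_assoc]
      · simpa [List.append_assoc] using hnd
      · intro d hd
        rcases List.mem_cons.mp hd with rfl | hd
        · exact ⟨⟨hc.1, hc.2.1⟩, way, by simp, rfl⟩
        · obtain ⟨hr, way', hw', he'⟩ := hdc d hd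
          exact ⟨hr, way', List.mem_cons_of_mem _ hw', he'⟩
      · intro w hw hge hle
        rcases List.mem_cons.mp hw with rfl | hw
        · simp
        · have := hcl w hw hge hle
          simp only [List.mem_append, List.mem_cons] at this ⊢
          tauto
    · obtain ⟨δ, he, hnd, hdc, hcl⟩ := ih s b hs
      refine ⟨δ, ?_, hnd, ?_, ?_⟩
      · rw [List.foldl_cons]
        have hstep : stepB num node (s, b) way = (s, b) := by
          simp only [stepB]
          rw [if_neg hc]
        rw [hstep]
        exact he
      · intro d hd
        obtain ⟨hr, way', hw', he'⟩ := hdc d hd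
        exact ⟨hr, way', List.mem_cons_of_mem _ hw', he'⟩
      · intro w hw hge hle
        rcases List.mem_cons.mp hw with rfl | hw
        · have hmem : node + w ∈ s := by
            by_contra hns
            exact hc ⟨hge, hle, by simpa using hns⟩
          exact List.mem_append_left _ hmem
        · exact hcl w hw hge hle

lemma passB_spec (num : Int) (numbers : List Int) :
    ∀ (snapshot : List Int) (s : List Int) (b : Bool), s.Nodup →
    ∃ δ : List Int,
      bfsPassB num numbers snapshot (s, b) = (s ++ δ, b || !δ.isEmpty) ∧
      (s ++ δ).Nodup ∧
      (∀ d ∈ δ, (1 ≤ d ∧ d ≤ num) ∧ ∃ x ∈ snapshot, d ∈ nbrs numbers x) ∧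
      (δ = [] → ∀ x ∈ snapshot, ∀ y ∈ nbrs numbers x, 1 ≤ y → y ≤ num → y ∈ s) := by
  intro snapshot
  induction snapshot with
  | nil =>
    intro s b hs
    exact ⟨[], by simp [bfsPassB], by simpa using hs, by simp, by simp⟩
  | cons x rest ih =>
    intro s b hs
    obtain ⟨δ₀, he₀, hnd₀, hdc₀, hcl₀⟩ :=
      foldB_spec num x [PySem.List.pyGetD numbers x 0, -(PySem.List.pyGetD numbers x 0)] s b hs
    obtain ⟨δ₁, he₁, hnd₁, hdc₁, hcl₁⟩ := ih (s ++ δ₀) (b || !δ₀.isEmpty) hnd₀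
    have hpass : bfsPassB num numbers (x :: rest) (s, b) =
        bfsPassB num numbers rest (s ++ δ₀, b || !δ₀.isEmpty) := by
      rw [← he₀]
      rfl
    refine ⟨δ₀ ++ δ₁, ?_, ?_, ?_, ?_⟩
    · rw [hpass, he₁]
      cases δ₀ <;> cases δ₁ <;> simp [List.append_assoc]
    · simpa [List.append_assoc] using hnd₁
    · intro d hd
      rcases List.mem_append.mp hd with hd | hd
      · obtain ⟨hr, way, hw, he'⟩ := hdc₀ d hd
        refine ⟨hr, x, by simp, ?_⟩
        rcases (by simpa using hw : way = PySem.List.pyGetD numbers x 0 ∨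
            way = -(PySem.List.pyGetD numbers x 0)) with rfl | rfl
        · simp [nbrs, he']
        · simp [nbrs, he']
      · obtain ⟨hr, x', hx', he'⟩ := hdc₁ d hd
        exact ⟨hr, x', List.mem_cons_of_mem _ hx', he'⟩
    · intro hδ
      have hδ0 : δ₀ = [] := (List.append_eq_nil_iff.mp hδ).1
      have hδ1 : δ₁ = [] := (List.append_eq_nil_iff.mp hδ).2
      intro x' hx' y hy hy1 hy2
      rcases List.mem_cons.mp hx' with rfl | hx'
      · have hy' : y = x' + PySem.List.pyGetD numbers x' 0 ∨
            y = x' + -(PySem.List.pyGetD numbers x' 0) := by simpa [nbrs] using hy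
        subst hδ0
        rcases hy' with rfl | rfl
        · simpa using hcl₀ _ (by simp) hy1 hy2
        · simpa using hcl₀ _ (by simp) hy1 hy2
      · subst hδ0
        simpa using hcl₁ hδ1 x' hx' y hy hy1 hy2

lemma fixB_good (num : Int) (numbers : List Int) (start : Int) :
    ∀ (fuel : Nat) (visited : List Int), visited.Nodup →
      (∀ v ∈ visited, v = start ∨ (1 ≤ v ∧ v ≤ num)) →
      num.toNat + 1 ≤ fuel + countIn num visited →
      (∀ x ∈ visited, x ∈ bfsFixB num numbers fuel visited) ∧
      (bfsFixB num numbers fuel visited).Nodup ∧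
      GoodSet num numbers (bfsFixB num numbers fuel visited) := by
  intro fuel
  induction fuel with
  | zero =>
    intro visited hnv hdom hm
    exfalso
    have := countIn_le num visited hnv
    omega
  | succ fuel ih =>
    intro visited hnv hdom hm
    obtain ⟨δ, he, hnd, hdc, hcl⟩ := passB_spec num numbers visited visited false hnv
    by_cases hδ : δ = []
    · subst hδ
      have hfix : bfsFixB num numbers (fuel + 1) visited = visited := by
        simp only [bfsFixB]
        rw [he]
        simp
      rw [hfix]
      exact ⟨fun x hx => hx, hnv, hcl rfl⟩
    · have hflag : (false || !δ.isEmpty) = true := by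
        cases δ with
        | nil => exact absurd rfl hδ
        | cons a l => simp
      have hfix : bfsFixB num numbers (fuel + 1) visited =
          bfsFixB num numbers fuel (visited ++ δ) := by
        simp only [bfsFixB]
        rw [he]
        simp [hflag]
      have hdom' : ∀ v ∈ visited ++ δ, v = start ∨ (1 ≤ v ∧ v ≤ num) := by
        intro v hv
        rcases List.mem_append.mp hv with hv | hv
        · exact hdom v hv
        · exact Or.inr (hdc v hv).1
      have hδlen : countIn num δ = δ.length := countIn_all num δ (fun d hd => (hdc d hd).1)
      have hδpos : 0 < δ.length := List.length_pos_iff.mpr hδ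
      have hm' : num.toNat + 1 ≤ fuel + countIn num (visited ++ δ) := by
        rw [countIn_append, hδlen]
        omega
      obtain ⟨ihmem, ihnd, ihgood⟩ := ih (visited ++ δ) hnd hdom' hm'
      rw [hfix]
      exact ⟨fun x hx => ihmem x (List.mem_append_left _ hx), ihnd, ihgood⟩

lemma fixB_subset (num : Int) (numbers : List Int) (T : List Int) (hT : GoodSet num numbers T) :
    ∀ (fuel : Nat) (visited : List Int), visited.Nodup → (∀ v ∈ visited, v ∈ T) →
      ∀ x ∈ bfsFixB num numbers fuel visited, x ∈ T := by
  intro fuel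
  induction fuel with
  | zero =>
    intro visited _ hv x hx
    exact hv x (by simpa [bfsFixB] using hx)
  | succ fuel ih =>
    intro visited hnv hv x hx
    obtain ⟨δ, he, hnd, hdc, hcl⟩ := passB_spec num numbers visited visited false hnv
    have hv' : ∀ a ∈ visited ++ δ, a ∈ T := by
      intro a ha
      rcases List.mem_append.mp ha with ha | ha
      · exact hv a ha
      · obtain ⟨hr, x', hx', hnb⟩ := hdc a ha
        exact hT x' (hv x' hx') a hnb hr.1 hr.2
    by_cases hδ : δ = []
    · subst hδ
      have hfix : bfsFixB num numbers (fuel + 1) visited = visited := by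
        simp only [bfsFixB]
        rw [he]
        simp
      rw [hfix] at hx
      exact hv x hx
    · have hflag : (false || !δ.isEmpty) = true := by
        cases δ with
        | nil => exact absurd rfl hδ
        | cons a l => simp
      have hfix : bfsFixB num numbers (fuel + 1) visited =
          bfsFixB num numbers fuel (visited ++ δ) := by
        simp only [bfsFixB]
        rw [he]
        simp [hflag]
      rw [hfix] at hx
      exact ih (visited ++ δ) hnd hv' x hx

-- ===== VERDICT (by name: the statement is the Claim_ definition above) =====
theorem bfs_spec : Claim_equal_bfs := by
  intro num numbers start _hdom _hpre
  unfold Spec_bfs bfs bfs_alt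
  have hof : PySem.Set.ofList [start] = [start] :=
    PySem.Set.ofList_eq_self_of_nodup [start] (List.nodup_singleton start)
  rw [hof]
  obtain ⟨hAmem, hAnd, hAgood⟩ := loopA_good num numbers start (num.toNat + 1) [start] [start]
    (List.nodup_singleton _) (List.nodup_singleton _)
    (fun q hq => hq)
    (by
      intro v hv hnq
      simp only [List.mem_singleton] at hv
      subst hv
      exact absurd (by simp) hnq)
    (by intro v hv; simp only [List.mem_singleton] at hv; exact Or.inl hv)
    (by simp only [List.length_cons, List.length_nil]; omega)
  obtain ⟨hBmem, hBnd, hBgood⟩ := fixB_good num numbers start (num.toNat + 2) [start]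
    (List.nodup_singleton _)
    (by intro v hv; simp only [List.mem_singleton] at hv; exact Or.inl hv)
    (by omega)
  have hstartA : start ∈ bfsLoopA num numbers (num.toNat + 1) [start] [start] :=
    hAmem start (by simp)
  have hstartB : start ∈ bfsFixB num numbers (num.toNat + 2) [start] :=
    hBmem start (by simp)
  have hAB := loopA_subset num numbers _ hBgood (num.toNat + 1) [start] [start]
    (by intro q hq; simp only [List.mem_singleton] at hq; subst hq; exact hstartB)
    (by intro v hv; simp only [List.mem_singleton] at hv; subst hv; exact hstartB)
  have hBA := fixB_subset num numbers _ hAgood (num.toNat + 2) [start]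
    (List.nodup_singleton _)
    (by intro v hv; simp only [List.mem_singleton] at hv; subst hv; exact hstartA)
  have hperm : (bfsLoopA num numbers (num.toNat + 1) [start] [start]).Perm
      (bfsFixB num numbers (num.toNat + 2) [start]) :=
    (List.perm_ext_iff_of_nodup hAnd hBnd).mpr (fun a => ⟨hAB a, hBA a⟩)
  rw [hperm.length_eq]
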